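-- pv_equiv track=rewrite | github.com/mgboot/morpho-phono | examples/analyse_poem.py | _rime_morphemes
-- ===== SOURCE A (Python) =====
-- def _rime_morphemes(rime_seg):
--     """Distinct (label, word) morpheme tags that the rime spans, in order."""
--     seen = set()
--     morphemes = []
--     for _, lbl, w in rime_seg:
--         key = (lbl, w)
--         if key not in seen:
--             seen.add(key)
--             morphemes.append(f"{lbl}({w})")
--     return morphemes
-- ===== SOURCE B (Python) =====
-- def _rime_morphemes(rime_seg):
--     """Distinct (label, word) morpheme tags that the rime spans, in order."""
--     morphemes = []
--     rest = list(rime_seg)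
--     while rest:
--         _, lbl, w = rest[0]
--         morphemes.append(f"{lbl}({w})")
--         rest = [t for t in rest[1:] if (t[1], t[2]) != (lbl, w)]
--     return morphemes
-- ===== Notes on version B (the rewrite author's own statement) =====
-- stated objective: alternative
-- what changed: Replaces the seen-set membership loop with a head-and-filter scheme: take the first remaining triple, emit its tag, and purge every later triple with the same (lbl, w) key from the worklist, so no auxiliary seen structure exists at all.
import Mathlib
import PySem

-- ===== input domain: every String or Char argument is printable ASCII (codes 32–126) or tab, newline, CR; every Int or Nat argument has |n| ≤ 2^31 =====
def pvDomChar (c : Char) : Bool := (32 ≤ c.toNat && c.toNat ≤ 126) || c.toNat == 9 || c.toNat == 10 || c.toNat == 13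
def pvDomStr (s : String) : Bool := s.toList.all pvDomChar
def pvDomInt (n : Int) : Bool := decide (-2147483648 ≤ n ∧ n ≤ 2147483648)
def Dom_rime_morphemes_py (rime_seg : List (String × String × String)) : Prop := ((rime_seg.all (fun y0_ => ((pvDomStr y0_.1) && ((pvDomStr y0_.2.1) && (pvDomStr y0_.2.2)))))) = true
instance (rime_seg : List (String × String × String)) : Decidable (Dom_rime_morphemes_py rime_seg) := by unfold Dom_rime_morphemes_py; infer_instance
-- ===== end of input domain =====

-- B replaces A's seen-set loop by a head-and-filter worklist (emit the head's tag,
-- purge later triples with the same key); alternative structure, same values.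

-- ===== PORT A =====
-- seen = set(); morphemes = []; for _, lbl, w in rime_seg: key=(lbl,w);
-- if key not in seen: seen.add(key); morphemes.append(f"{lbl}({w})")
def rime_morphemes_py (rime_seg : List (String × String × String)) : List String :=
  (rime_seg.foldl
    (fun (st : PySem.Set (String × String) × List String) t =>
      let key := (t.2.1, t.2.2)
      if PySem.Set.contains st.1 key then st
      else (PySem.Set.add st.1 key, st.2 ++ [t.2.1 ++ "(" ++ t.2.2 ++ ")"]))
    (PySem.Set.empty, [])).2

-- ===== PORT B =====
-- while rest: _, lbl, w = rest[0]; emit f"{lbl}({w})";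
-- rest = [t for t in rest[1:] if (t[1], t[2]) != (lbl, w)]
def rime_morphemes_py_alt (rime_seg : List (String × String × String)) : List String :=
  match rime_seg with
  | [] => []
  | t :: rest =>
      (t.2.1 ++ "(" ++ t.2.2 ++ ")") ::
      rime_morphemes_py_alt (rest.filter (fun u => (u.2.1, u.2.2) ≠ (t.2.1, t.2.2)))
termination_by rime_seg.length
decreasing_by
  simp only [List.length_unattach]
  exact Nat.lt_succ_of_le (le_trans (List.length_filter_le _ _) (by simp))

-- ===== PRECONDITION & SPEC =====
def Spec_rime_morphemes_py (rime_seg : List (String × String × String)) (out : List String) : Prop := out = rime_morphemes_py_alt rime_seg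
instance (rime_seg : List (String × String × String)) (out : List String) : Decidable (Spec_rime_morphemes_py rime_seg out) := by unfold Spec_rime_morphemes_py; infer_instance

-- ===== CLAIM (what is proved, stated in full; the proofs are below) =====
def Claim_equal_rime_morphemes_py : Prop := ∀ (rime_seg : List (String × String × String)), Dom_rime_morphemes_py rime_seg → Spec_rime_morphemes_py rime_seg (rime_morphemes_py rime_seg)

-- ===== LEMMAS AND PROOFS =====
-- Loop invariant for A's fold: from state (seen, acc) it appends exactly B's
-- output on xs with the already-seen keys filtered away.
theorem rimeA_foldl_inv (xs : List (String × String × String))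
    (seen : PySem.Set (String × String)) (acc : List String) :
    (xs.foldl
      (fun (st : PySem.Set (String × String) × List String) t =>
        let key := (t.2.1, t.2.2)
        if PySem.Set.contains st.1 key then st
        else (PySem.Set.add st.1 key, st.2 ++ [t.2.1 ++ "(" ++ t.2.2 ++ ")"]))
      (seen, acc)).2 =
    acc ++ rime_morphemes_py_alt
      (xs.filter (fun u => ¬ (u.2.1, u.2.2) ∈ seen)) := by
  induction xs generalizing seen acc with
  | nil => simp [rime_morphemes_py_alt]
  | cons t rest ih =>
    simp only [List.foldl_cons, List.filter_cons]
    by_cases h : (t.2.1, t.2.2) ∈ seen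
    · rw [if_pos (by simpa [PySem.Set.contains_iff] using h)]
      rw [if_neg (by simpa using h)]
      exact ih seen acc
    · rw [if_neg (by simpa [PySem.Set.contains_iff] using h)]
      rw [if_pos (by simpa using h)]
      rw [ih (PySem.Set.add seen (t.2.1, t.2.2)) _]
      rw [rime_morphemes_py_alt]
      have hfe :
          rest.filter (fun u => ¬ (u.2.1, u.2.2) ∈ PySem.Set.add seen (t.2.1, t.2.2)) =
          (rest.filter (fun u => ¬ (u.2.1, u.2.2) ∈ seen)).filter
            (fun u => (u.2.1, u.2.2) ≠ (t.2.1, t.2.2)) := by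
        rw [List.filter_filter]
        apply List.filter_congr
        intro u _
        simp [PySem.Set.mem_add, not_or, and_comm]
      rw [hfe]
      simp

-- ===== VERDICT (by name: the statement is the Claim_ definition above) =====
theorem rime_morphemes_py_spec : Claim_equal_rime_morphemes_py := by
  intro rime_seg _
  unfold Spec_rime_morphemes_py rime_morphemes_py
  rw [rimeA_foldl_inv rime_seg PySem.Set.empty []]
  simp [PySem.Set.empty]
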